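-- pv_equiv track=rewrite | github.com/sw-maestro-15-coma/coma-consumer | heatmap-popular-point-parser/service/heatmap.py | get_without_duplicate
-- ===== SOURCE A (Python) =====
-- from typing import List
--
-- def get_without_duplicate(points: List[int], take: int) -> List[int]:
--     top_points: List[int] = []
--
--     for point in points:
--         if len(top_points) >= take:
--             break
--
--         for top_point in top_points:
--             if top_point - 60 < point < top_point + 60:
--                 break
--         else:
--             top_points.append(point)
--
--     return top_points
-- ===== SOURCE B (Python) =====
-- from typing import List
--
--
-- def get_without_duplicate(points: List[int], take: int) -> List[int]:
--     # Bucket accepted points by point // 60: any two points closer than 60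
--     # land in adjacent (or the same) buckets, and each bucket can hold at
--     # most one accepted point, so the O(take) inner scan becomes O(1) dict work.
--     buckets = {}
--     top_points: List[int] = []
--     for point in points:
--         if len(top_points) >= take:
--             break
--         b = point // 60
--         if any(k in buckets and abs(buckets[k] - point) < 60 for k in (b - 1, b, b + 1)):
--             continue
--         buckets[b] = point
--         top_points.append(point)
--     return top_points
-- ===== Notes on version B (the rewrite author's own statement) =====
-- stated objective: faster
-- what changed: Replaces the inner linear scan over all accepted points by a hash-bucket index keyed by point // 60: since accepted points are pairwise >= 60 apart, each bucket holds at most one point and a conflict can only sit in the three adjacent buckets, so each point is decided with O(1) dict lookups.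
import Mathlib
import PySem

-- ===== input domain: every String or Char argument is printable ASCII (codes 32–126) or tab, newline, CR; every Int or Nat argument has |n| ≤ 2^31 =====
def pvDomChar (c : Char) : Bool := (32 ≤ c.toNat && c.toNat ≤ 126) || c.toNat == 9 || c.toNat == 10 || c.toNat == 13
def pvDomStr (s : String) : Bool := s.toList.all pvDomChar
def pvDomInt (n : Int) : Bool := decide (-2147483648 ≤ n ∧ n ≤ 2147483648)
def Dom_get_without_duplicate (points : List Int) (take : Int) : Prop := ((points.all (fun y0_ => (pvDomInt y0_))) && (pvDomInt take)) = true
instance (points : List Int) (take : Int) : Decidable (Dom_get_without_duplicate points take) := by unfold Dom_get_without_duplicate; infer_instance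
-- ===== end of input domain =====

-- B replaces A's inner linear scan over accepted points by a hash-bucket index
-- keyed by point // 60, deciding each point with O(1) dict lookups (objective: faster).


-- ===== PORT A =====
-- outer loop with break: structural recursion; the inner for/else break is an existence scan
def pvA_go (take : Int) (acc : List Int) : List Int → List Int
  | [] => acc
  | point :: rest =>
    if (acc.length : Int) ≥ take then acc
    else if acc.any (fun q => decide (q - 60 < point) && decide (point < q + 60)) then
      pvA_go take acc rest
    else
      pvA_go take (acc ++ [point]) rest

def get_without_duplicate (points : List Int) (take : Int) : List Int :=
  pvA_go take [] points

-- ===== PORT B =====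
-- `k in buckets and abs(buckets[k] - point) < 60`
def pvB_hit (d : PySem.Dict Int Int) (point k : Int) : Bool :=
  match d.get? k with
  | some q => decide (|q - point| < 60)
  | none => false

-- `any(... for k in (b - 1, b, b + 1))`
def pvB_conflict (d : PySem.Dict Int Int) (point b : Int) : Bool :=
  [b - 1, b, b + 1].any (pvB_hit d point)

def pvB_go (take : Int) (d : PySem.Dict Int Int) (acc : List Int) : List Int → List Int
  | [] => acc
  | point :: rest =>
    if (acc.length : Int) ≥ take then acc
    else
      let b := PySem.Int.floordiv point 60
      if pvB_conflict d point b then pvB_go take d acc rest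
      else pvB_go take (d.insert b point) (acc ++ [point]) rest

def get_without_duplicate_alt (points : List Int) (take : Int) : List Int :=
  pvB_go take PySem.Dict.empty [] points

-- ===== PRECONDITION & SPEC =====
def Spec_get_without_duplicate (points : List Int) (take : Int) (out : List Int) : Prop := out = get_without_duplicate_alt points take
instance (points : List Int) (take : Int) (out : List Int) : Decidable (Spec_get_without_duplicate points take out) := by unfold Spec_get_without_duplicate; infer_instance

-- ===== CLAIM (what is proved, stated in full; the proofs are below) =====
def Claim_equal_get_without_duplicate : Prop := ∀ (points : List Int) (take : Int), Dom_get_without_duplicate points take → Spec_get_without_duplicate points take (get_without_duplicate points take)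

-- ===== LEMMAS AND PROOFS =====

-- the dict invariant: d maps a bucket to exactly the accepted points of that bucket
def pvInv (d : PySem.Dict Int Int) (acc : List Int) : Prop :=
  ∀ k q, d.get? k = some q ↔ (q ∈ acc ∧ PySem.Int.floordiv q 60 = k)

theorem pv_bucket_bounds (p : Int) :
    PySem.Int.floordiv p 60 * 60 ≤ p ∧ p < (PySem.Int.floordiv p 60 + 1) * 60 :=
  (PySem.Int.floordiv_eq_iff_of_pos (by norm_num)).mp rfl

theorem pv_close_adjacent {p q : Int} (h : |q - p| < 60) :
    PySem.Int.floordiv q 60 = PySem.Int.floordiv p 60 - 1 ∨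
    PySem.Int.floordiv q 60 = PySem.Int.floordiv p 60 ∨
    PySem.Int.floordiv q 60 = PySem.Int.floordiv p 60 + 1 := by
  have hp := pv_bucket_bounds p
  have hq := pv_bucket_bounds q
  rw [abs_lt] at h
  omega

theorem pv_same_bucket_close {p q : Int}
    (h : PySem.Int.floordiv q 60 = PySem.Int.floordiv p 60) : |q - p| < 60 := by
  have hp := pv_bucket_bounds p
  have hq := pv_bucket_bounds q
  rw [abs_lt]
  omega

theorem pv_conflict_iff {d : PySem.Dict Int Int} {acc : List Int} (hInv : pvInv d acc)
    (p : Int) :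
    (acc.any (fun q => decide (q - 60 < p) && decide (p < q + 60))) =
      pvB_conflict d p (PySem.Int.floordiv p 60) := by
  apply Bool.eq_iff_iff.mpr
  simp only [List.any_eq_true, Bool.and_eq_true, decide_eq_true_eq, pvB_conflict, pvB_hit]
  constructor
  · rintro ⟨q, hq, h1, h2⟩
    refine ⟨PySem.Int.floordiv q 60, ?_, ?_⟩
    · have := pv_close_adjacent (p := p) (q := q) (by rw [abs_lt]; omega)
      simp only [List.mem_cons]
      tauto
    · rw [(hInv _ q).mpr ⟨hq, rfl⟩]
      simp only [decide_eq_true_eq]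
      rw [abs_lt]; omega
  · rintro ⟨k, _, hk⟩
    rcases hget : d.get? k with _ | q
    · rw [hget] at hk; exact absurd hk (by simp)
    · rw [hget] at hk
      simp only [decide_eq_true_eq, abs_lt] at hk
      exact ⟨q, ((hInv k q).mp hget).1, by omega, by omega⟩

theorem pv_inv_insert {d : PySem.Dict Int Int} {acc : List Int} {p : Int}
    (hInv : pvInv d acc)
    (hno : pvB_conflict d p (PySem.Int.floordiv p 60) = false) :
    pvInv (d.insert (PySem.Int.floordiv p 60) p) (acc ++ [p]) := by
  intro k q
  rw [PySem.Dict.get?_insert]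
  have hbnone : ∀ q', q' ∈ acc → PySem.Int.floordiv q' 60 ≠ PySem.Int.floordiv p 60 := by
    intro q' hq' heq
    have hhit : ¬ pvB_hit d p (PySem.Int.floordiv p 60) = true := by
      simp only [pvB_conflict, List.any_eq_false, List.mem_cons, List.not_mem_nil,
        or_false] at hno
      exact hno _ (Or.inr (Or.inl rfl))
    apply hhit
    rw [pvB_hit, (hInv _ q').mpr ⟨hq', heq⟩]
    simp only [decide_eq_true_eq]
    exact pv_same_bucket_close heq
  by_cases hk : k = PySem.Int.floordiv p 60
  · rw [if_pos hk]
    constructor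
    · intro h
      have hq : p = q := Option.some.inj h
      subst hq
      exact ⟨by simp, hk.symm⟩
    · rintro ⟨hq, hb⟩
      rcases List.mem_append.mp hq with hq | hq
      · exact absurd (hb.trans hk) (hbnone q hq)
      · rw [List.mem_singleton.mp hq]
  · rw [if_neg hk, hInv k q]
    simp only [List.mem_append, List.mem_singleton]
    constructor
    · rintro ⟨hq, hb⟩; exact ⟨Or.inl hq, hb⟩
    · rintro ⟨hq | rfl, hb⟩
      · exact ⟨hq, hb⟩
      · exact absurd hb.symm hk

theorem pv_go_eq (take : Int) :
    ∀ (rest acc : List Int) (d : PySem.Dict Int Int), pvInv d acc →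
      pvA_go take acc rest = pvB_go take d acc rest := by
  intro rest
  induction rest with
  | nil => intro acc d _; rfl
  | cons p rest ih =>
    intro acc d hInv
    rw [pvA_go, pvB_go]
    by_cases hlen : (acc.length : Int) ≥ take
    · rw [if_pos hlen, if_pos hlen]
    · rw [if_neg hlen, if_neg hlen]
      simp only []
      rw [pv_conflict_iff hInv p]
      by_cases hc : pvB_conflict d p (PySem.Int.floordiv p 60) = true
      · rw [if_pos hc, if_pos hc]
        exact ih acc d hInv
      · rw [if_neg hc, if_neg hc]
        exact ih _ _ (pv_inv_insert hInv (Bool.not_eq_true _ ▸ hc))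

theorem pv_inv_empty : pvInv PySem.Dict.empty [] := by
  intro k q
  simp [PySem.Dict.get?_empty]

-- ===== VERDICT (by name: the statement is the Claim_ definition above) =====
theorem get_without_duplicate_spec : Claim_equal_get_without_duplicate := by
  intro points take _
  unfold Spec_get_without_duplicate get_without_duplicate get_without_duplicate_alt
  exact pv_go_eq take points [] PySem.Dict.empty pv_inv_empty
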